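-- pv_equiv track=rewrite | github.com/benny-lo/network-modeling-Fall2023 | Assignment2/task1.py | transitivity
-- ===== SOURCE A (Python) =====
-- def transitivity(nodes, edge_list, node):
--     count = 0
--     for edge in edge_list:
--         if edge[0] == node and (edge[1], edge[0]) in edge_list:
--             for trans_node in nodes:
--                 if (node, trans_node) in edge_list and (trans_node, edge[1]) in edge_list:
--                     count += 1
--     return count
-- ===== SOURCE B (Python) =====
-- def transitivity(nodes, edge_list, node):
--     E = set(edge_list)
--     cnt = {}
--     for t in nodes:
--         if (node, t) in E:
--             cnt[t] = cnt.get(t, 0) + 1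
--     memo = {}
--     total = 0
--     for a, b in edge_list:
--         if a == node and (b, a) in E:
--             if b not in memo:
--                 memo[b] = sum(c for t, c in cnt.items() if (t, b) in E)
--             total += memo[b]
--     return total
-- ===== Notes on version B (the rewrite author's own statement) =====
-- stated objective: alternative
-- what changed: B builds a hash set of the edges, a per-node multiplicity counter restricted to the node's successors, and a memo of the inner count per distinct target, so the inner scan of nodes with repeated O(m) list-membership tests is replaced by an index build plus one pass over the counter per distinct matching target.
import Mathlib
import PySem

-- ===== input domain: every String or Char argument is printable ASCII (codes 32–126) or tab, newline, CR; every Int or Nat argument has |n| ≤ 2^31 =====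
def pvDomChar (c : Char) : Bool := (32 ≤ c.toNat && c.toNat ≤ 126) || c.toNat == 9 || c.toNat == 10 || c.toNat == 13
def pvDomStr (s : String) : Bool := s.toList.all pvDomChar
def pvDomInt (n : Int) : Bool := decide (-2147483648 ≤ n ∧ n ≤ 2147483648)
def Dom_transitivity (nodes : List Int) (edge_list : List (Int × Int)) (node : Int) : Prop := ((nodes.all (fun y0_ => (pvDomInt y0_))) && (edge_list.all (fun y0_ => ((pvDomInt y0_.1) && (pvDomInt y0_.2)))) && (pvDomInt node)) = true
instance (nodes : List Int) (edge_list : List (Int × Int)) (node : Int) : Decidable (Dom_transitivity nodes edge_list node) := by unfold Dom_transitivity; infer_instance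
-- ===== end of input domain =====

-- B replaces A's repeated list-membership scans by a hash set of edges, a per-node
-- multiplicity counter, and a per-target memo of the inner count (objective: alternative).

-- ===== PORT A =====
def transitivity (nodes : List Int) (edge_list : List (Int × Int)) (node : Int) : Int :=
  edge_list.foldl (fun count edge =>
    if edge.1 == node && edge_list.contains (edge.2, edge.1) then
      nodes.foldl (fun c t =>
        if edge_list.contains (node, t) && edge_list.contains (t, edge.2) then c + 1 else c) count
    else count) 0

-- ===== PORT B =====
def transitivity_alt (nodes : List Int) (edge_list : List (Int × Int)) (node : Int) : Int :=
  let E : PySem.Set (Int × Int) := PySem.Set.ofList edge_list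
  let cnt : PySem.Dict Int Int :=
    nodes.foldl (fun d t =>
      if PySem.Set.contains E (node, t) then d.insert t (d.getD t 0 + 1) else d) PySem.Dict.empty
  let st := edge_list.foldl (fun (st : PySem.Dict Int Int × Int) e =>
    if e.1 == node && PySem.Set.contains E (e.2, e.1) then
      let memo := if st.1.contains e.2 then st.1
                  else st.1.insert e.2
                        (cnt.items.foldl (fun s tc =>
                          if PySem.Set.contains E (tc.1, e.2) then s + tc.2 else s) 0)
      (memo, st.2 + memo.getD e.2 0)
    else st) (PySem.Dict.empty, (0 : Int))
  st.2

-- ===== PRECONDITION & SPEC =====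
def Spec_transitivity (nodes : List Int) (edge_list : List (Int × Int)) (node : Int) (out : Int) : Prop := out = transitivity_alt nodes edge_list node
instance (nodes : List Int) (edge_list : List (Int × Int)) (node : Int) (out : Int) : Decidable (Spec_transitivity nodes edge_list node out) := by unfold Spec_transitivity; infer_instance

-- ===== CLAIM (what is proved, stated in full; the proofs are below) =====
def Claim_equal_transitivity : Prop := ∀ (nodes : List Int) (edge_list : List (Int × Int)) (node : Int), Dom_transitivity nodes edge_list node → Spec_transitivity nodes edge_list node (transitivity nodes edge_list node)

-- ===== LEMMAS AND PROOFS =====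

-- set(edge_list) membership agrees with list membership
theorem pv_setc (l : List (Int × Int)) (x : Int × Int) :
    PySem.Set.contains (PySem.Set.ofList l) x = l.contains x := by
  rw [Bool.eq_iff_iff]
  simp [PySem.Set.mem_ofList]

-- counting fold = length of filter
theorem pv_fold_count {α : Type} (p : α → Bool) (l : List α) (c0 : Int) :
    l.foldl (fun c t => if p t then c + 1 else c) c0 = c0 + ((l.filter p).length : Int) := by
  induction l generalizing c0 with
  | nil => simp
  | cons x xs ih =>
    by_cases h : p x <;> simp [h, ih, Int.add_comm, Int.add_left_comm]

-- guarded summing fold = sum of a map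
theorem pv_fold_sum {α : Type} (p : α → Bool) (f : α → Int) (l : List α) (s0 : Int) :
    l.foldl (fun s k => if p k then s + f k else s) s0
      = s0 + (l.map (fun k => if p k then f k else 0)).sum := by
  induction l generalizing s0 with
  | nil => simp
  | cons x xs ih =>
    by_cases h : p x
    · simp [h, ih]; ring
    · simp [h, ih]

-- guarded fold over l = plain fold over l.filter
theorem pv_fold_filter {α β : Type} (p : α → Bool) (f : β → α → β) (l : List α) (init : β) :
    l.foldl (fun d t => if p t then f d t else d) init = (l.filter p).foldl f init := by
  induction l generalizing init with
  | nil => rfl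
  | cons x xs ih => by_cases h : p x <;> simp [h, ih]

theorem pv_sum_indicator (x : Int) (d : List Int) (hn : d.Nodup) (hx : x ∈ d) :
    (d.map (fun k => if k = x then (1 : Int) else 0)).sum = 1 := by
  induction d with
  | nil => cases hx
  | cons y ys ih =>
    rcases List.mem_cons.mp hx with h | h
    · subst h
      have hz : (List.map (fun k => if k = x then (1 : Int) else 0) ys).sum = 0 := by
        apply List.sum_eq_zero
        intro z hz
        obtain ⟨k, hk, rfl⟩ := List.mem_map.mp hz
        have : k ≠ x := fun he => (List.nodup_cons.mp hn).1 (he ▸ hk)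
        simp [this]
      simp [hz]
    · have hyx : y ≠ x := fun he => (List.nodup_cons.mp hn).1 (he ▸ h)
      simp [hyx, ih (List.nodup_cons.mp hn).2 h]

-- the core: summing counts over the distinct elements = filtered length
theorem pv_sum_count (p : Int → Bool) (xs d : List Int) (hn : d.Nodup)
    (hx : ∀ y ∈ xs, y ∈ d) :
    (d.map (fun k => if p k then (xs.count k : Int) else 0)).sum
      = ((xs.filter p).length : Int) := by
  induction xs with
  | nil => simp
  | cons x xs ih =>
    have hx' : ∀ y ∈ xs, y ∈ d := fun y hy => hx y (List.mem_cons_of_mem _ hy)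
    have hxd : x ∈ d := hx x List.mem_cons_self
    have hsplit : ∀ k : Int,
        (if p k then (((x :: xs).count k : Nat) : Int) else 0)
          = (if p k then (xs.count k : Int) else 0)
            + (if p x then (if k = x then (1 : Int) else 0) else 0) := by
      intro k
      by_cases hk : p k
      · by_cases he : k = x
        · subst he; simp [List.count_cons_self, hk]
        · have : (x :: xs).count k = xs.count k := by
            rw [List.count_cons]; simp [Ne.symm he]
          by_cases hpx : p x <;> simp [this, hk, he, hpx]
      · by_cases he : k = x
        · subst he; simp [hk]
        · simp [hk, he]
    calc (d.map (fun k => if p k then (((x :: xs).count k : Nat) : Int) else 0)).sum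
        = (d.map (fun k => (if p k then (xs.count k : Int) else 0)
            + (if p x then (if k = x then (1 : Int) else 0) else 0))).sum := by
          congr 1; exact List.map_congr_left (fun k _ => hsplit k)
      _ = (d.map (fun k => if p k then (xs.count k : Int) else 0)).sum
            + (d.map (fun k => if p x then (if k = x then (1 : Int) else 0) else 0)).sum := by
          rw [← List.sum_map_add]
      _ = ((xs.filter p).length : Int) + (if p x then (1 : Int) else 0) := by
          rw [ih hx']
          congr 1
          by_cases hpx : p x
          · simp only [hpx, if_true]; exact pv_sum_indicator x d hn hxd
          · simp [hpx]
      _ = (((x :: xs).filter p).length : Int) := by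
          by_cases hpx : p x <;> simp [hpx]

-- the common inner value: number of transitive witnesses in `nodes` for target b
def pvF (nodes : List Int) (edge_list : List (Int × Int)) (node b : Int) : Int :=
  ((nodes.filter (fun t => edge_list.contains (node, t) && edge_list.contains (t, b))).length : Int)

-- A computes the sum of pvF over its matching edges
theorem pv_A_sum (nodes : List Int) (edge_list : List (Int × Int)) (node : Int) :
    transitivity nodes edge_list node
      = (edge_list.map (fun e =>
          if e.1 == node && edge_list.contains (e.2, e.1)
          then pvF nodes edge_list node e.2 else 0)).sum := by
  unfold transitivity
  have gen : ∀ (l : List (Int × Int)) (c0 : Int),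
      l.foldl (fun count edge =>
        if edge.1 == node && edge_list.contains (edge.2, edge.1) then
          nodes.foldl (fun c t =>
            if edge_list.contains (node, t) && edge_list.contains (t, edge.2) then c + 1 else c) count
        else count) c0
      = c0 + (l.map (fun e =>
          if e.1 == node && edge_list.contains (e.2, e.1)
          then pvF nodes edge_list node e.2 else 0)).sum := by
    intro l
    induction l with
    | nil => simp
    | cons e l ih =>
      intro c0
      by_cases h : (e.1 == node && edge_list.contains (e.2, e.1)) = true
      · simp only [List.foldl_cons, h, if_true, ih, List.map_cons, List.sum_cons]
        rw [pv_fold_count (fun t => edge_list.contains (node, t) && edge_list.contains (t, e.2))]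
        unfold pvF
        ring
      · simp only [List.foldl_cons, h, if_false, ih, List.map_cons, List.sum_cons,
          Bool.not_eq_true] at *
        simp [ih]
  simpa using gen edge_list 0

-- B's inner sum over the counter equals pvF
theorem pv_S_eq_F (nodes : List Int) (edge_list : List (Int × Int)) (node b : Int) :
    ((nodes.foldl (fun d t =>
        if PySem.Set.contains (PySem.Set.ofList edge_list) (node, t)
        then d.insert t (d.getD t 0 + 1) else d) PySem.Dict.empty).items.foldl
      (fun s tc => if PySem.Set.contains (PySem.Set.ofList edge_list) (tc.1, b) then s + tc.2 else s) 0)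
      = pvF nodes edge_list node b := by
  simp only [pv_setc]
  have hcnt : (nodes.foldl (fun d t =>
        if edge_list.contains (node, t) then d.insert t (d.getD t 0 + 1) else d) PySem.Dict.empty)
      = PySem.Dict.counter (nodes.filter (fun t => edge_list.contains (node, t))) := by
    rw [pv_fold_filter, PySem.Dict.foldl_insert_getD_add_one_eq_counter]
  rw [hcnt]
  rw [PySem.Dict.items_counter]
  rw [List.foldl_map]
  rw [pv_fold_sum (fun k => edge_list.contains (k, b))
        (fun k => ((nodes.filter (fun t => edge_list.contains (node, t))).count k : Int))]
  rw [pv_sum_count (fun k => edge_list.contains (k, b))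
        (nodes.filter (fun t => edge_list.contains (node, t)))
        (PySem.Set.ofList (nodes.filter (fun t => edge_list.contains (node, t))))
        (PySem.Set.nodup_ofList _)
        (fun y hy => (PySem.Set.mem_ofList _ _).mpr hy)]
  unfold pvF
  rw [List.filter_filter]
  have hc : ∀ a ∈ nodes,
      (decide ((a, b) ∈ edge_list) && decide ((node, a) ∈ edge_list))
        = (decide ((node, a) ∈ edge_list) && decide ((a, b) ∈ edge_list)) := by
    intro a _
    rw [Bool.and_comm]
  simp only [zero_add, List.contains_eq_mem]
  rw [List.filter_congr hc]

theorem pv_B_sum (nodes : List Int) (edge_list : List (Int × Int)) (node : Int) :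
    transitivity_alt nodes edge_list node
      = (edge_list.map (fun e =>
          if e.1 == node && edge_list.contains (e.2, e.1)
          then pvF nodes edge_list node e.2 else 0)).sum := by
  have gen : ∀ (guard : Int × Int → Bool) (Sf : Int → Int) (l : List (Int × Int))
      (memo : PySem.Dict Int Int) (total : Int),
      (∀ k v, memo.get? k = some v → v = Sf k) →
      (l.foldl (fun (st : PySem.Dict Int Int × Int) e =>
        if guard e then
          let memo := if st.1.contains e.2 then st.1 else st.1.insert e.2 (Sf e.2)
          (memo, st.2 + memo.getD e.2 0)
        else st) (memo, total)).2
      = total + (l.map (fun e => if guard e then Sf e.2 else 0)).sum := by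
    intro guard Sf l
    induction l with
    | nil => intro memo total _; simp
    | cons e l ih =>
      intro memo total hinv
      by_cases h : guard e = true
      · simp only [List.foldl_cons, h, if_true, List.map_cons, List.sum_cons]
        by_cases hc : memo.contains e.2 = true
        · have hs : memo.getD e.2 0 = Sf e.2 := by
            rw [PySem.Dict.contains_eq_isSome_get?] at hc
            obtain ⟨v, hv⟩ := Option.isSome_iff_exists.mp hc
            rw [PySem.Dict.getD_eq_get?_getD, hv, Option.getD_some]
            exact hinv _ _ hv
          simp only [hc, if_true]
          rw [ih memo (total + memo.getD e.2 0) hinv, hs]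
          ring
        · simp only [hc]
          have hinv' : ∀ k v, (memo.insert e.2 (Sf e.2)).get? k = some v → v = Sf k := by
            intro k v hk
            rw [PySem.Dict.get?_insert] at hk
            by_cases he : k = e.2
            · subst he
              simp only [if_true, Option.some.injEq] at hk
              omega
            · rw [if_neg he] at hk
              exact hinv _ _ hk
          have hg : (memo.insert e.2 (Sf e.2)).getD e.2 0 = Sf e.2 := by
            rw [PySem.Dict.getD_insert]
            simp
          simp only [Bool.false_eq_true, if_false]
          rw [ih _ _ hinv', hg]
          ring
      · simp only [Bool.not_eq_true] at h
        simp only [List.foldl_cons, h, List.map_cons, List.sum_cons]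
        simp [ih memo total hinv]
  refine Eq.trans (gen
      (fun e => e.1 == node && PySem.Set.contains (PySem.Set.ofList edge_list) (e.2, e.1))
      (fun (bb : Int) => ((nodes.foldl (fun (d : PySem.Dict Int Int) (t : Int) =>
          if PySem.Set.contains (PySem.Set.ofList edge_list) (node, t)
          then d.insert t (d.getD t 0 + 1) else d) PySem.Dict.empty).items.foldl
            (fun (s : Int) (tc : Int × Int) => if PySem.Set.contains (PySem.Set.ofList edge_list) (tc.1, bb) then s + tc.2 else s) 0 : Int))
      edge_list PySem.Dict.empty 0
      (by intro k v hv; simp [PySem.Dict.get?_empty] at hv)) ?_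
  rw [zero_add]
  congr 1
  apply List.map_congr_left
  intro e _
  beta_reduce
  rw [pv_setc]
  by_cases h : (e.1 == node && edge_list.contains (e.2, e.1)) = true
  · simp only [h, if_true]
    exact pv_S_eq_F nodes edge_list node e.2
  · have hne : ¬ (e.1 = node ∧ (e.2, e.1) ∈ edge_list) := by
      simpa using h
    simp [hne]

-- ===== VERDICT (by name: the statement is the Claim_ definition above) =====
theorem transitivity_spec : Claim_equal_transitivity := by
  intro nodes edge_list node _
  unfold Spec_transitivity
  rw [pv_A_sum, pv_B_sum]
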